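-- pv_equiv track=rewrite | github.com/bmattern/xray | xray/elements.py | periodic_table_index
-- ===== SOURCE A (Python) =====
-- def periodic_table_index(Z):
--   """
--   Locations of elements in periodic table
--
--   Parameters:
--     Z: atomic number
--
--   Returns:
--     (row,col) 0-indexed
--
--   Lanthanides and actinides rows are indexed 7 and 8
--   """
--   if 1 > Z or Z > 118:
--     raise ValueError("Must have 1 <= Z <= 118")
--
--   if 57 <= Z <= 70: # lanthanides
--     return (7,3+Z-57)
--
--   if 89 <= Z <= 102: # actinides
--     return (8, 3+Z-89)
--
--   # everything else
--   lasts = [2,10,18,36,54,86,118]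
--   for i,l in enumerate(lasts):
--     if Z <= l:
--       if i == 0:
--         col = 0 if Z == 1 else 17
--       elif i == 1:
--         col = Z-3 if Z < 5 else 12 + Z-5
--       elif i == 2:
--         col = Z-11 if Z < 13 else 12 + Z-13
--       elif i == 3:
--         col = Z - 19
--       elif i == 4:
--         col = Z - 37
--       if i == 5:
--         col = Z-55 if Z < 57 else 2 + Z-71
--       elif i == 6:
--         col = Z-87 if Z < 89 else 2 + Z-103
--
--       return i,col
--
--   raise ValueError()
-- ===== SOURCE B (Python) =====
-- # Periodic table layout stated as explicit data: rows of atomic numbers (0 = gap),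
-- # inverted once into a Z -> (row, col) lookup table.
--
-- _ROWS = [
--     [1, 0, 0, 0, 0, 0, 0, 0, 0, 0, 0, 0, 0, 0, 0, 0, 0, 2],
--     [3, 4, 0, 0, 0, 0, 0, 0, 0, 0, 0, 0, 5, 6, 7, 8, 9, 10],
--     [11, 12, 0, 0, 0, 0, 0, 0, 0, 0, 0, 0, 13, 14, 15, 16, 17, 18],
--     [19, 20, 21, 22, 23, 24, 25, 26, 27, 28, 29, 30, 31, 32, 33, 34, 35, 36],
--     [37, 38, 39, 40, 41, 42, 43, 44, 45, 46, 47, 48, 49, 50, 51, 52, 53, 54],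
--     [55, 56, 71, 72, 73, 74, 75, 76, 77, 78, 79, 80, 81, 82, 83, 84, 85, 86],
--     [87, 88, 103, 104, 105, 106, 107, 108, 109, 110, 111, 112, 113, 114, 115, 116, 117, 118],
--     [0, 0, 0, 57, 58, 59, 60, 61, 62, 63, 64, 65, 66, 67, 68, 69, 70, 0],
--     [0, 0, 0, 89, 90, 91, 92, 93, 94, 95, 96, 97, 98, 99, 100, 101, 102, 0],
-- ]
--
-- def _build_table():
--     table = {}
--     for row, zs in enumerate(_ROWS):
--         for col, z in enumerate(zs):
--             if z:
--                 table[z] = (row, col)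
--     return table
--
-- _TABLE = _build_table()
--
-- def periodic_table_index(Z):
--   """
--   Locations of elements in periodic table
--
--   Parameters:
--     Z: atomic number
--
--   Returns:
--     (row,col) 0-indexed
--
--   Lanthanides and actinides rows are indexed 7 and 8
--   """
--   if 1 > Z or Z > 118:
--     raise ValueError("Must have 1 <= Z <= 118")
--   return _TABLE[Z]
-- ===== Notes on version B (the rewrite author's own statement) =====
-- stated objective: idiomatic
-- what changed: Replaces A's per-period arithmetic branch chain with the table layout stated as explicit row data, inverted once into a Z->(row,col) dict, so the function is a range check plus a single lookup.
import Mathlib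
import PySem

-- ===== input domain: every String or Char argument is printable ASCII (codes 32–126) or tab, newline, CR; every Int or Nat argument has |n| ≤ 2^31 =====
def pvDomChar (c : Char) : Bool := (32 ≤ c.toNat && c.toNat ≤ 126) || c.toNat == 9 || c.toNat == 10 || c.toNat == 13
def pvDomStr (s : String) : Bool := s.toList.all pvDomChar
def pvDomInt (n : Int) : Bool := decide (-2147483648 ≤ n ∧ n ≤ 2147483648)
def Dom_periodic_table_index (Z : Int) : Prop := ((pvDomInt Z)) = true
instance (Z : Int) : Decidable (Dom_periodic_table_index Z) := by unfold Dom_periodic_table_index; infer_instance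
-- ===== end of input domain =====

-- B states the periodic-table layout as explicit row data inverted into a lookup dict,
-- instead of A's per-period column arithmetic (objective: idiomatic; return value only).


-- ===== PORT A =====
-- the body of A's for-loop: the first if/elif chain, then the second 'if i == 5 / elif i == 6' chain
def pvACol (i Z : Int) : Int :=
  let col : Int :=
    if i = 0 then (if Z = 1 then 0 else 17)
    else if i = 1 then (if Z < 5 then Z - 3 else 12 + Z - 5)
    else if i = 2 then (if Z < 13 then Z - 11 else 12 + Z - 13)
    else if i = 3 then Z - 19
    else if i = 4 then Z - 37
    else 0  -- Python leaves col unbound here; for i = 5, 6 it is assigned by the next chain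
  if i = 5 then (if Z < 57 then Z - 55 else 2 + Z - 71)
  else if i = 6 then (if Z < 89 then Z - 87 else 2 + Z - 103)
  else col

-- 'for i, l in enumerate(lasts): if Z <= l: return i, col'
def pvALoop (Z : Int) : List (Int × Int) → Option (Int × Int)
  | [] => none
  | (i, l) :: rest => if Z ≤ l then some (i, pvACol i Z) else pvALoop Z rest

def periodic_table_index (Z : Int) : Int × Int :=
  -- 'if 1 > Z or Z > 118: raise ValueError' — excluded by Pre_
  if 57 ≤ Z ∧ Z ≤ 70 then (7, 3 + Z - 57)
  else if 89 ≤ Z ∧ Z ≤ 102 then (8, 3 + Z - 89)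
  else
    -- final 'raise ValueError()' (none) is unreachable for 1 ≤ Z ≤ 118
    (pvALoop Z [(0, 2), (1, 10), (2, 18), (3, 36), (4, 54), (5, 86), (6, 118)]).getD (0, 0)

-- ===== PORT B =====
-- the layout as data: 9 rows of atomic numbers in column position, 0 = gap
def pvRows : List (List Int) :=
  [ [1, 0, 0, 0, 0, 0, 0, 0, 0, 0, 0, 0, 0, 0, 0, 0, 0, 2],
    [3, 4, 0, 0, 0, 0, 0, 0, 0, 0, 0, 0, 5, 6, 7, 8, 9, 10],
    [11, 12, 0, 0, 0, 0, 0, 0, 0, 0, 0, 0, 13, 14, 15, 16, 17, 18],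
    [19, 20, 21, 22, 23, 24, 25, 26, 27, 28, 29, 30, 31, 32, 33, 34, 35, 36],
    [37, 38, 39, 40, 41, 42, 43, 44, 45, 46, 47, 48, 49, 50, 51, 52, 53, 54],
    [55, 56, 71, 72, 73, 74, 75, 76, 77, 78, 79, 80, 81, 82, 83, 84, 85, 86],
    [87, 88, 103, 104, 105, 106, 107, 108, 109, 110, 111, 112, 113, 114, 115, 116, 117, 118],
    [0, 0, 0, 57, 58, 59, 60, 61, 62, 63, 64, 65, 66, 67, 68, 69, 70, 0],
    [0, 0, 0, 89, 90, 91, 92, 93, 94, 95, 96, 97, 98, 99, 100, 101, 102, 0] ]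

-- _build_table: invert the layout into Z -> (row, col)
def pvTable : PySem.Dict Int (Int × Int) :=
  (PySem.List.enumerate pvRows).foldl
    (fun t rzs =>
      (PySem.List.enumerate rzs.2).foldl
        (fun t cz => if cz.2 ≠ 0 then t.insert cz.2 (rzs.1, cz.1) else t) t)
    PySem.Dict.empty

def periodic_table_index_alt (Z : Int) : Int × Int :=
  -- out-of-range Z raises ValueError in Python (excluded by Pre_); KeyError is unreachable
  -- since the table covers exactly 1..118
  (pvTable.get? Z).getD (0, 0)

-- ===== PRECONDITION & SPEC =====
-- Pre_ excludes exactly the inputs on which A raises ValueError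
def Pre_periodic_table_index (Z : Int) : Prop := 1 ≤ Z ∧ Z ≤ 118
instance (Z : Int) : Decidable (Pre_periodic_table_index Z) := by unfold Pre_periodic_table_index; infer_instance
def pvWitness_periodic_table_index : Int := 30

def Spec_periodic_table_index (Z : Int) (out : Int × Int) : Prop := out = periodic_table_index_alt Z
instance (Z : Int) (out : Int × Int) : Decidable (Spec_periodic_table_index Z out) := by unfold Spec_periodic_table_index; infer_instance

-- ===== CLAIM (what is proved, stated in full; the proofs are below) =====
def Claim_equal_periodic_table_index : Prop := ∀ (Z : Int), Dom_periodic_table_index Z → Pre_periodic_table_index Z → Spec_periodic_table_index Z (periodic_table_index Z)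

-- ===== LEMMAS AND PROOFS =====
set_option maxRecDepth 10000 in
theorem pv_agree_on_range : ∀ z ∈ Finset.Icc (1 : Int) 118, periodic_table_index z = periodic_table_index_alt z := by decide

-- ===== VERDICT (by name: the statement is the Claim_ definition above) =====
theorem periodic_table_index_spec : Claim_equal_periodic_table_index := by
  intro Z _ hpre
  exact pv_agree_on_range Z (Finset.mem_Icc.mpr ⟨hpre.1, hpre.2⟩)
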